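-- pv_equiv track=rewrite | github.com/Rishab95-hub/iol-ai-code-review-RishabhDwivedi | src/github_integration.py | should_block_pr
-- ===== SOURCE A (Python) =====
-- from typing import List, Dict, Any, Optional
--
-- def should_block_pr(severity_counts: Dict[str, int], threshold: str) -> bool:
--     """Determine if PR should be blocked based on severity threshold"""
--     threshold_map = {
--         'none': [],
--         'suggestion': ['suggestion', 'warning', 'critical'],
--         'warning': ['warning', 'critical'],
--         'critical': ['critical']
--     }
--
--     blocking_severities = threshold_map.get(threshold.lower(), [])
--
--     for severity in blocking_severities:
--         if severity_counts.get(severity, 0) > 0: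
--             return True
--
--     return False
-- ===== SOURCE B (Python) =====
-- def should_block_pr(severity_counts, threshold):
--     """Ordinal severity levels instead of a threshold->blocking-list map;
--     scan the counts dict once and block on any positive count at or above the threshold level."""
--     levels = {'suggestion': 1, 'warning': 2, 'critical': 3}
--     t = levels.get(threshold.lower())
--     if t is None:
--         return False
--     for sev, count in severity_counts.items():
--         if count > 0 and levels.get(sev, 0) >= t:
--             return True
--     return False
-- ===== Notes on version B (the rewrite author's own statement) =====
-- stated objective: idiomatic
-- what changed: Replaces the threshold->blocking-list map and loop over a fixed blocking list with an ordinal severity map and a single scan of severity_counts.items() comparing levels; Pre_ only requires the association list to have distinct keys, the invariant every Python dict argument satisfies.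
import Mathlib
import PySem

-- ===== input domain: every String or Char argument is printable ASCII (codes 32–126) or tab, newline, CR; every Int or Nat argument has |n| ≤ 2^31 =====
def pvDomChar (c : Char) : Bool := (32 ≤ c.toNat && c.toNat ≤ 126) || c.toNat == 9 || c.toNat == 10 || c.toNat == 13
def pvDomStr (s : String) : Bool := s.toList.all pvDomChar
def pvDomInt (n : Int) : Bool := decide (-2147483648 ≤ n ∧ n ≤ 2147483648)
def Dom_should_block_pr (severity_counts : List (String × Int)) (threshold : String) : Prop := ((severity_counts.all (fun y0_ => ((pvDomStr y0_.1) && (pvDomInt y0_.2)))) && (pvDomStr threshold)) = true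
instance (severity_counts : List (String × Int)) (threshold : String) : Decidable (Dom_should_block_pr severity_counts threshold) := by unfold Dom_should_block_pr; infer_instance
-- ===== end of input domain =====

-- B replaces A's threshold→blocking-list map with an ordinal severity map and one scan of the
-- counts dict; proved equal on association lists with distinct keys (the Python-dict invariant).


-- ===== PORT A =====
-- 'for severity in blocking_severities: if severity_counts.get(severity,0) > 0: return True'
def sbpA_loop (counts : PySem.Dict String Int) : List String → Bool
  | [] => false
  | s :: rest => if counts.getD s 0 > 0 then true else sbpA_loop counts rest

def should_block_pr (severity_counts : List (String × Int)) (threshold : String) : Bool :=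
  let threshold_map : PySem.Dict String (List String) :=
    PySem.Dict.ofList [("none", []),
                       ("suggestion", ["suggestion", "warning", "critical"]),
                       ("warning", ["warning", "critical"]),
                       ("critical", ["critical"])]
  let blocking_severities := threshold_map.getD (PySem.Str.lower threshold) []
  sbpA_loop (PySem.Dict.mk severity_counts) blocking_severities

-- ===== PORT B =====
def sbpLevels : PySem.Dict String Int :=
  PySem.Dict.ofList [("suggestion", 1), ("warning", 2), ("critical", 3)]

-- 'for sev, count in severity_counts.items(): if count > 0 and levels.get(sev,0) >= t: return True'
def sbpB_loop (t : Int) : List (String × Int) → Bool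
  | [] => false
  | (sev, c) :: rest => if c > 0 && sbpLevels.getD sev 0 ≥ t then true else sbpB_loop t rest

def should_block_pr_alt (severity_counts : List (String × Int)) (threshold : String) : Bool :=
  match sbpLevels.get? (PySem.Str.lower threshold) with
  | none => false
  | some t => sbpB_loop t severity_counts

-- ===== PRECONDITION & SPEC =====
-- Pre_ requires the association list's keys to be distinct: this is the invariant of the Python
-- dict argument severity_counts (a list with duplicate keys represents no Python dict).
def Pre_should_block_pr (severity_counts : List (String × Int)) (threshold : String) : Prop :=
  (severity_counts.map Prod.fst).Nodup
instance (severity_counts : List (String × Int)) (threshold : String) : Decidable (Pre_should_block_pr severity_counts threshold) := by unfold Pre_should_block_pr; infer_instance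

def pvWitness_should_block_pr : (List (String × Int)) × String := ([("warning", 2), ("suggestion", 0)], "warning")

def Spec_should_block_pr (severity_counts : List (String × Int)) (threshold : String) (out : Bool) : Prop := out = should_block_pr_alt severity_counts threshold
instance (severity_counts : List (String × Int)) (threshold : String) (out : Bool) : Decidable (Spec_should_block_pr severity_counts threshold out) := by unfold Spec_should_block_pr; infer_instance

-- ===== CLAIM (what is proved, stated in full; the proofs are below) =====
def Claim_equal_should_block_pr : Prop := ∀ (severity_counts : List (String × Int)) (threshold : String), Dom_should_block_pr severity_counts threshold → Pre_should_block_pr severity_counts threshold → Spec_should_block_pr severity_counts threshold (should_block_pr severity_counts threshold)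

-- ===== LEMMAS AND PROOFS =====

-- A's loop is an 'any' over the blocking list.
theorem sbpA_loop_eq_any (counts : PySem.Dict String Int) (bl : List String) :
    sbpA_loop counts bl = bl.any (fun s => counts.getD s 0 > 0) := by
  induction bl with
  | nil => rfl
  | cons s rest ih =>
    simp only [sbpA_loop, List.any_cons, ← ih]
    split_ifs with h <;> simp_all

-- B's loop is an 'any' over the counts list.
theorem sbpB_loop_eq_any (t : Int) (counts : List (String × Int)) :
    sbpB_loop t counts = counts.any (fun p => p.2 > 0 && sbpLevels.getD p.1 0 ≥ t) := by
  induction counts with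
  | nil => rfl
  | cons p rest ih =>
    obtain ⟨sev, c⟩ := p
    simp only [sbpB_loop, List.any_cons, ← ih]
    split_ifs with h <;> simp_all

theorem sbp_getD_mk_cons (k : String) (c : Int) (rest : List (String × Int)) (s : String) :
    (PySem.Dict.mk ((k, c) :: rest)).getD s 0 = if k = s then c else (PySem.Dict.mk rest).getD s 0 := by
  rw [PySem.Dict.getD_eq_get?_getD, PySem.Dict.get?_mk_cons]
  by_cases h : k = s <;> simp [h, PySem.Dict.getD_eq_get?_getD]

theorem sbp_getD_not_mem (rest : List (String × Int)) (k : String)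
    (h : k ∉ rest.map Prod.fst) : (PySem.Dict.mk rest).getD k 0 = 0 := by
  induction rest with
  | nil => rfl
  | cons p r ih =>
    obtain ⟨k', c'⟩ := p
    simp only [List.map_cons, List.mem_cons] at h
    push_neg at h
    rw [sbp_getD_mk_cons]
    rw [if_neg (fun hkk => h.1 (Eq.symm hkk))]
    exact ih h.2

-- Crux: under distinct keys, scanning a blocking list with dict lookups equals
-- scanning the counts with a membership test.
theorem sbp_crux (bl : List String) (counts : List (String × Int))
    (hnd : (counts.map Prod.fst).Nodup) :
    bl.any (fun s => (PySem.Dict.mk counts).getD s 0 > 0)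
      = counts.any (fun p => p.2 > 0 && decide (p.1 ∈ bl)) := by
  induction counts with
  | nil =>
    simp [PySem.Dict.getD_eq_get?_getD]
    intro s _hs
    rfl
  | cons p rest ih =>
    obtain ⟨k, c⟩ := p
    simp only [List.map_cons, List.nodup_cons] at hnd
    obtain ⟨hk, hnd'⟩ := hnd
    have hstep : ∀ s : String,
        (PySem.Dict.mk ((k, c) :: rest)).getD s 0 = if k = s then c else (PySem.Dict.mk rest).getD s 0 :=
      fun s => sbp_getD_mk_cons k c rest s
    by_cases hmem : k ∈ bl
    · by_cases hc : c > 0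
      · have hL : bl.any (fun s => (PySem.Dict.mk ((k, c) :: rest)).getD s 0 > 0) = true := by
          refine List.any_eq_true.2 ⟨k, hmem, ?_⟩
          simp [hstep k, hc]
        simp [hL, hmem, hc]
      · have hcong : ∀ s ∈ bl,
            decide ((PySem.Dict.mk ((k, c) :: rest)).getD s 0 > 0)
              = decide ((PySem.Dict.mk rest).getD s 0 > 0) := by
          intro s _hs
          rw [hstep s]
          by_cases hks : k = s
          · subst hks
            simp [hc, sbp_getD_not_mem rest k hk]
          · simp [hks]
        rw [PySem.List.any_congr_mem hcong, ih hnd']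
        simp [hc]
    · have hcong : ∀ s ∈ bl,
          decide ((PySem.Dict.mk ((k, c) :: rest)).getD s 0 > 0)
            = decide ((PySem.Dict.mk rest).getD s 0 > 0) := by
        intro s hs
        rw [hstep s]
        have : k ≠ s := fun h => hmem (h ▸ hs)
        simp [this]
      rw [PySem.List.any_congr_mem hcong, ih hnd']
      simp [hmem]

-- The two per-key conditions agree for each concrete threshold level.
theorem sbp_level_mem (bl : List String) (t : Int)
    (hbl : ∀ k : String, decide (k ∈ bl) = decide (sbpLevels.getD k 0 ≥ t))
    (counts : List (String × Int)) (hnd : (counts.map Prod.fst).Nodup) :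
    sbpA_loop (PySem.Dict.mk counts) bl = sbpB_loop t counts := by
  rw [sbpA_loop_eq_any, sbpB_loop_eq_any, sbp_crux bl counts hnd]
  refine PySem.List.any_congr_mem (fun p _hp => ?_)
  rw [hbl p.1]

theorem sbp_level_cond (t : Int) (bl : List String) (ht : 0 < t)
    (hb : ∀ s : String, s ∈ bl ↔ (s = "suggestion" ∨ s = "warning" ∨ s = "critical") ∧ sbpLevels.getD s 0 ≥ t)
    (k : String) : decide (k ∈ bl) = decide (sbpLevels.getD k 0 ≥ t) := by
  by_cases h1 : k = "suggestion"
  · subst h1; simp [hb]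
  · by_cases h2 : k = "warning"
    · subst h2; simp [hb]
    · by_cases h3 : k = "critical"
      · subst h3; simp [hb]
      · have hmk : sbpLevels = PySem.Dict.mk [("suggestion", 1), ("warning", 2), ("critical", 3)] := by
          decide
        have hlv : sbpLevels.getD k 0 = 0 := by
          rw [hmk, PySem.Dict.getD_eq_get?_getD]
          have h1' : ¬("suggestion" = k) := fun h => h1 (Eq.symm h)
          have h2' : ¬("warning" = k) := fun h => h2 (Eq.symm h)
          have h3' : ¬("critical" = k) := fun h => h3 (Eq.symm h)
          simp [PySem.Dict.get?_mk_cons, h1', h2', h3']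
          rfl
        simp only [hlv]
        have hnb : k ∉ bl := fun hm => absurd ((hb k).1 hm).1 (by simp [h1, h2, h3])
        simp [hnb]
        omega

theorem sbp_hb (bl : List String) (t : Int)
    (h : ∀ s : String, (s = "suggestion" ∨ s = "warning" ∨ s = "critical") →
          (s ∈ bl ↔ (s = "suggestion" ∨ s = "warning" ∨ s = "critical") ∧ sbpLevels.getD s 0 ≥ t))
    (hnone : ∀ s : String, s ∈ bl → (s = "suggestion" ∨ s = "warning" ∨ s = "critical")) :
    ∀ s : String, s ∈ bl ↔ (s = "suggestion" ∨ s = "warning" ∨ s = "critical") ∧ sbpLevels.getD s 0 ≥ t := by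
  intro s
  by_cases e : s = "suggestion" ∨ s = "warning" ∨ s = "critical"
  · exact h s e
  · constructor
    · intro hm; exact absurd (hnone s hm) e
    · intro hc; exact absurd hc.1 e

-- ===== VERDICT (by name: the statement is the Claim_ definition above) =====
theorem should_block_pr_spec : Claim_equal_should_block_pr := by
  intro sc th _hdom hpre
  unfold Spec_should_block_pr should_block_pr should_block_pr_alt
  simp only []
  by_cases c1 : PySem.Str.lower th = "none"
  · rw [c1]
    have hA : (PySem.Dict.ofList [("none", ([] : List String)),
        ("suggestion", ["suggestion", "warning", "critical"]),
        ("warning", ["warning", "critical"]),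
        ("critical", ["critical"])]).getD "none" [] = [] := by decide
    have hB : sbpLevels.get? "none" = none := by decide
    rw [hA, hB]
    rfl
  · by_cases c2 : PySem.Str.lower th = "suggestion"
    · rw [c2]
      have hA : (PySem.Dict.ofList [("none", ([] : List String)),
          ("suggestion", ["suggestion", "warning", "critical"]),
          ("warning", ["warning", "critical"]),
          ("critical", ["critical"])]).getD "suggestion" [] = ["suggestion", "warning", "critical"] := by decide
      have hB : sbpLevels.get? "suggestion" = some 1 := by decide
      rw [hA, hB]
      refine sbp_level_mem _ 1 (sbp_level_cond 1 _ (by omega) (sbp_hb _ 1 ?_ ?_)) sc hpre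
      · intro s hs
        rcases hs with h | h | h <;> subst h <;> decide
      · intro s hs
        simpa using hs
    · by_cases c3 : PySem.Str.lower th = "warning"
      · rw [c3]
        have hA : (PySem.Dict.ofList [("none", ([] : List String)),
            ("suggestion", ["suggestion", "warning", "critical"]),
            ("warning", ["warning", "critical"]),
            ("critical", ["critical"])]).getD "warning" [] = ["warning", "critical"] := by decide
        have hB : sbpLevels.get? "warning" = some 2 := by decide
        rw [hA, hB]
        refine sbp_level_mem _ 2 (sbp_level_cond 2 _ (by omega) (sbp_hb _ 2 ?_ ?_)) sc hpre
        · intro s hs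
          rcases hs with h | h | h <;> subst h <;> decide
        · intro s hs
          simp at hs
          tauto
      · by_cases c4 : PySem.Str.lower th = "critical"
        · rw [c4]
          have hA : (PySem.Dict.ofList [("none", ([] : List String)),
              ("suggestion", ["suggestion", "warning", "critical"]),
              ("warning", ["warning", "critical"]),
              ("critical", ["critical"])]).getD "critical" [] = ["critical"] := by decide
          have hB : sbpLevels.get? "critical" = some 3 := by decide
          rw [hA, hB]
          refine sbp_level_mem _ 3 (sbp_level_cond 3 _ (by omega) (sbp_hb _ 3 ?_ ?_)) sc hpre
          · intro s hs
            rcases hs with h | h | h <;> subst h <;> decide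
          · intro s hs
            simp at hs
            exact Or.inr (Or.inr hs)
        · have hTmk : (PySem.Dict.ofList [("none", ([] : List String)),
              ("suggestion", ["suggestion", "warning", "critical"]),
              ("warning", ["warning", "critical"]),
              ("critical", ["critical"])]) = PySem.Dict.mk [("none", []),
              ("suggestion", ["suggestion", "warning", "critical"]),
              ("warning", ["warning", "critical"]),
              ("critical", ["critical"])] := by decide
          have hLmk : sbpLevels = PySem.Dict.mk [("suggestion", (1 : Int)), ("warning", 2), ("critical", 3)] := by decide
          have n1 : ¬("none" = PySem.Str.lower th) := fun h => c1 (Eq.symm h)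
          have n2 : ¬("suggestion" = PySem.Str.lower th) := fun h => c2 (Eq.symm h)
          have n3 : ¬("warning" = PySem.Str.lower th) := fun h => c3 (Eq.symm h)
          have n4 : ¬("critical" = PySem.Str.lower th) := fun h => c4 (Eq.symm h)
          have hA : (PySem.Dict.mk [("none", ([] : List String)),
              ("suggestion", ["suggestion", "warning", "critical"]),
              ("warning", ["warning", "critical"]),
              ("critical", ["critical"])]).getD (PySem.Str.lower th) [] = [] := by
            rw [PySem.Dict.getD_eq_get?_getD]
            simp [PySem.Dict.get?_mk_cons, n1, n2, n3, n4]
            rfl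
          have hB : sbpLevels.get? (PySem.Str.lower th) = none := by
            rw [hLmk]
            simp [PySem.Dict.get?_mk_cons, n2, n3, n4]
            rfl
          rw [hTmk, hA, hB]
          rfl
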